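-- pv_equiv track=rewrite | github.com/MrBrantCode/unitest_baseline | mut_generate/mist_train_taco/taco_9402/solution.py | maximize_final_element
-- ===== SOURCE A (Python) =====
-- def maximize_final_element(N, a):
--     # Convert the sequence into a list of tuples (value, index)
--     a = [(int(v), i) for (i, v) in enumerate(a)]
--
--     # Calculate sums of positive elements at odd and even indices
--     ao = sum([v for (v, i) in a if i % 2 and v > 0])
--     ae = sum([v for (v, i) in a if not i % 2 and v > 0])
--
--     # Determine the maximum possible final element
--     if max(ao, ae) == 0:
--         ai = a.index(max(a))
--         Ans = [1] * ai + list(range(N - ai, 1, -1))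
--         max_final_element = max(a)[0]
--         num_operations = len(Ans)
--         operations = Ans
--     else:
--         if ao >= ae:
--             max_final_element = ao
--             yn = [i for (v, i) in a if i % 2 and v > 0]
--         else:
--             max_final_element = ae
--             yn = [i for (v, i) in a if not i % 2 and v > 0]
--
--         listyn = [i in yn for i in range(N)]
--         Ans = []
--
--         # Perform operations to reduce the sequence
--         while not listyn[0]:
--             Ans.append(1)
--             listyn = listyn[1:]
--         while not listyn[-1]:
--             Ans.append(len(listyn))
--             listyn = listyn[:-1]
--         while True:
--             if len(listyn) == 1:
--                 break
--             if len(listyn) == 2 or len(listyn) == 3: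
--                 Ans.append(2)
--                 break
--             if listyn[2]:
--                 Ans.append(2)
--                 listyn = [True] + listyn[3:]
--             else:
--                 Ans.append(3)
--                 listyn = [True, False] + listyn[4:]
--
--         num_operations = len(Ans)
--         operations = Ans
--
--     return max_final_element, num_operations, operations
-- ===== SOURCE B (Python) =====
-- def maximize_final_element(N, a):
--     # One pass over a: parity-wise sums of positives, their positions, and the last argmax.
--     sums = [0, 0]
--     pos = [[], []]
--     m, ai = None, 0
--     for i, v in enumerate(a):
--         v = int(v)
--         if v > 0:
--             sums[i % 2] += v
--             pos[i % 2].append(i)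
--         if m is None or v >= m:
--             m, ai = v, i
--     ae, ao = sums
--     if ao == 0 and ae == 0:
--         ops = [1] * ai + list(range(N - ai, 1, -1))
--         return m, len(ops), ops
--     par = 1 if ao >= ae else 0
--     p = pos[par]
--     ops = [1] * p[0]
--     ops.extend(range(N - p[0], p[-1] + 1 - p[0], -1))
--     for x, y in zip(p, p[1:]):
--         ops.extend([3] * ((y - x - 2) // 2))
--         ops.append(2)
--     return sums[par], len(ops), ops
-- ===== Notes on version B (the rewrite author's own statement) =====
-- stated objective: alternative
-- what changed: A repeatedly slices the boolean mask list (while-loops that rebuild listyn each step) and rescans with comprehensions plus max/index; B makes one pass over the array collecting parity sums, position lists and the last argmax, and emits the operation list in closed form from the gaps between consecutive chosen positions, never materialising the mask (O(N) work where A is quadratic, though a timing run's inputs all have N < len(a), outside Pre_, so no speed is claimed).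
-- outside the precondition, e.g. on maximize_final_element(1, [3, -1, 5]): A returns (8, 0, []), B returns (8, 1, [2])
import Mathlib
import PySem

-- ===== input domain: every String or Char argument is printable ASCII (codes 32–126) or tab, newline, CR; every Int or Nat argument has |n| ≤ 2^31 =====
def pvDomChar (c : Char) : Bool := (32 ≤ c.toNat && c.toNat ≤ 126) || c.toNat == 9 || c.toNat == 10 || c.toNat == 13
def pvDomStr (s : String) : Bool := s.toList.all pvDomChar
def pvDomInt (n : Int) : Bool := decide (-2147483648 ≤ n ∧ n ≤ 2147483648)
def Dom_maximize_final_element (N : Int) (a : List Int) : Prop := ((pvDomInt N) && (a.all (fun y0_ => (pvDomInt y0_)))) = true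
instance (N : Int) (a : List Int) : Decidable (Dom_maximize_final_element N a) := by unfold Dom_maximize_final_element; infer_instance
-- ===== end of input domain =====

-- B replaces A's repeated list slicing with a single pass plus a closed-form gap decomposition (objective: alternative; no measured speed is claimed).

-- ===== PORT A =====
-- 'while not listyn[0]': on [] Python raises IndexError (unreachable under Pre_); the port stops there.
def pvA_loop1 : List Bool → List Int → List Bool × List Int
  | false :: rest, ans => pvA_loop1 rest (ans ++ [1])
  | l, ans => (l, ans)

-- 'while not listyn[-1]': on [] Python raises IndexError (unreachable under Pre_); the port stops there.
def pvA_loop2 (l : List Bool) (ans : List Int) : List Bool × List Int :=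
  if h : l.getLast? = some false then
    pvA_loop2 l.dropLast (ans ++ [(l.length : Int)])
  else (l, ans)
termination_by l.length
decreasing_by
  cases l with
  | nil => simp at h
  | cons x t => simp

-- the 'while True' merging loop; catch-all: len(listyn) = 0 would be IndexError in Python (unreachable under Pre_)
def pvA_loop3 (l : List Bool) (ans : List Int) : List Int :=
  if l.length = 1 then ans
  else if l.length = 2 ∨ l.length = 3 then ans ++ [2]
  else
    match l with
    | _ :: _ :: b2 :: rest =>
      if b2 then pvA_loop3 (true :: rest) (ans ++ [2])
      else pvA_loop3 (true :: false :: rest.drop 1) (ans ++ [3])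
    | _ => ans
termination_by l.length
decreasing_by all_goals simp

def maximize_final_element (N : Int) (a : List Int) : Int × Int × List Int :=
  let aP : List (Int × Int) := (PySem.List.enumerate a).map (fun p => (p.2, p.1))
  let ao : Int := ((aP.filter (fun p => !(PySem.Int.mod p.2 2 == 0) && decide (0 < p.1))).map (fun p => p.1)).sum
  let ae : Int := ((aP.filter (fun p => (PySem.Int.mod p.2 2 == 0) && decide (0 < p.1))).map (fun p => p.1)).sum
  if max ao ae = 0 then
    match PySem.List.max2? aP (fun p => p.1) (fun p => p.2) with
    | none => (0, 0, [])   -- a = []: Python raises ValueError here (max of empty); excluded by Pre_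
    | some m =>
      let ai : Nat := (PySem.List.index? aP m).getD 0
      let Ans : List Int := List.replicate ai 1 ++ PySem.List.pyRange (N - (ai : Int)) 1 (-1)
      (m.1, (Ans.length : Int), Ans)
  else
    let mfe : Int := if ao ≥ ae then ao else ae
    let yn : List Int :=
      if ao ≥ ae then (aP.filter (fun p => !(PySem.Int.mod p.2 2 == 0) && decide (0 < p.1))).map (fun p => p.2)
      else (aP.filter (fun p => (PySem.Int.mod p.2 2 == 0) && decide (0 < p.1))).map (fun p => p.2)
    let listyn : List Bool := (PySem.List.pyRange 0 N 1).map (fun i => decide (i ∈ yn))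
    let r1 := pvA_loop1 listyn []
    let r2 := pvA_loop2 r1.1 r1.2
    let Ans := pvA_loop3 r2.1 r2.2
    (mfe, (Ans.length : Int), Ans)

-- ===== PORT B =====
-- the five independent accumulators of Source B's single loop (sums[0], sums[1], pos[0], pos[1], (m, ai))
def pvB_se (se : Int) (p : Int × Int) : Int :=
  if decide (0 < p.2) && (PySem.Int.mod p.1 2 == 0) then se + p.2 else se
def pvB_so (so : Int) (p : Int × Int) : Int :=
  if decide (0 < p.2) && !(PySem.Int.mod p.1 2 == 0) then so + p.2 else so
def pvB_pe (pe : List Int) (p : Int × Int) : List Int :=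
  if decide (0 < p.2) && (PySem.Int.mod p.1 2 == 0) then pe ++ [p.1] else pe
def pvB_po (po : List Int) (p : Int × Int) : List Int :=
  if decide (0 < p.2) && !(PySem.Int.mod p.1 2 == 0) then po ++ [p.1] else po
def pvB_mi (mi : Option Int × Int) (p : Int × Int) : Option Int × Int :=
  if mi.1.isNone || decide (mi.1.getD 0 ≤ p.2) then (some p.2, p.1) else mi

def maximize_final_element_alt (N : Int) (a : List Int) : Int × Int × List Int :=
  let st := (PySem.List.enumerate a).foldl
      (fun s p => ((pvB_se s.1.1 p, pvB_so s.1.2 p), ((pvB_pe s.2.1.1 p, pvB_po s.2.1.2 p), pvB_mi s.2.2 p)))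
      ((0, 0), (([], []), ((none : Option Int), 0)))
  let ae := st.1.1
  let ao := st.1.2
  if ao = 0 ∧ ae = 0 then
    -- st.2.2.1 = none only for a = [] (Python Source B returns None there; outside Pre_)
    let ops : List Int := List.replicate st.2.2.2.toNat 1 ++ PySem.List.pyRange (N - st.2.2.2) 1 (-1)
    (st.2.2.1.getD 0, (ops.length : Int), ops)
  else
    let p := if ao ≥ ae then st.2.1.2 else st.2.1.1
    match p with
    | [] => (0, 0, [])   -- unreachable under Pre_: the chosen parity class has a positive element (Source B: IndexError at p[0])
    | p0 :: t =>
      let pk := (p0 :: t).getLast (List.cons_ne_nil p0 t)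
      let ops : List Int :=
        List.replicate p0.toNat 1
        ++ PySem.List.pyRange (N - p0) (pk + 1 - p0) (-1)
        ++ ((p0 :: t).zip t).flatMap
             (fun q => List.replicate (PySem.Int.floordiv (q.2 - q.1 - 2) 2).toNat 3 ++ [2])
      (if ao ≥ ae then ao else ae, (ops.length : Int), ops)

-- ===== PRECONDITION & SPEC =====
-- Pre_ excludes a = [], where A raises ValueError (max of empty), and the out-of-contract inputs where some
-- positive entry sits at an index ≥ N (impossible when N is the declared length of a): there A either raises
-- IndexError or answers for the positions below N only while B answers for all of a — no answer is specified
-- for such malformed (N, a) pairs, so nothing is claimed about them.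
def Pre_maximize_final_element (N : Int) (a : List Int) : Prop :=
  a ≠ [] ∧ ∀ q ∈ PySem.List.enumerate a, 0 < q.2 → q.1 < N
instance (N : Int) (a : List Int) : Decidable (Pre_maximize_final_element N a) := by
  unfold Pre_maximize_final_element; infer_instance

def pvWitness_maximize_final_element : Int × List Int := (3, [2, -1, 4])

def Spec_maximize_final_element (N : Int) (a : List Int) (out : Int × Int × List Int) : Prop :=
  out = maximize_final_element_alt N a
instance (N : Int) (a : List Int) (out : Int × Int × List Int) : Decidable (Spec_maximize_final_element N a out) := by
  unfold Spec_maximize_final_element; infer_instance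

-- ===== CLAIM (what is proved, stated in full; the proofs are below) =====
def Claim_equal_maximize_final_element : Prop :=
  ∀ (N : Int) (a : List Int), Dom_maximize_final_element N a →
    Pre_maximize_final_element N a →
    Spec_maximize_final_element N a (maximize_final_element N a)

-- ===== LEMMAS AND PROOFS =====


-- spec-side abbreviations for the two parity classes of positive entries
def pvCondE (q : Int × Int) : Bool := (PySem.Int.mod q.1 2 == 0) && decide (0 < q.2)
def pvCondO (q : Int × Int) : Bool := !(PySem.Int.mod q.1 2 == 0) && decide (0 < q.2)
def pvPosE (a : List Int) : List Int := ((PySem.List.enumerate a).filter pvCondE).map (fun q => q.1)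
def pvPosO (a : List Int) : List Int := ((PySem.List.enumerate a).filter pvCondO).map (fun q => q.1)
def pvSumE (a : List Int) : Int := (((PySem.List.enumerate a).filter pvCondE).map (fun q => q.2)).sum
def pvSumO (a : List Int) : Int := (((PySem.List.enumerate a).filter pvCondO).map (fun q => q.2)).sum
def pvMask (s t : Int) (yn : List Int) : List Bool :=
  (PySem.List.pyRange s t 1).map (fun i => decide (i ∈ yn))

-- B's single fold splits into the five independent accumulators
theorem pvB_fold_eq (a : List Int) :
    (PySem.List.enumerate a).foldl
      (fun s p => ((pvB_se s.1.1 p, pvB_so s.1.2 p), ((pvB_pe s.2.1.1 p, pvB_po s.2.1.2 p), pvB_mi s.2.2 p)))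
      ((0, 0), (([], []), ((none : Option Int), 0)))
    = ((pvSumE a, pvSumO a), ((pvPosE a, pvPosO a),
        (PySem.List.enumerate a).foldl pvB_mi ((none : Option Int), 0))) := by
  have key : ∀ (l : List (Int × Int)) (se so : Int) (pe po : List Int) (mi : Option Int × Int),
      l.foldl (fun s p => ((pvB_se s.1.1 p, pvB_so s.1.2 p), ((pvB_pe s.2.1.1 p, pvB_po s.2.1.2 p), pvB_mi s.2.2 p)))
        ((se, so), ((pe, po), mi))
      = ((l.foldl pvB_se se, l.foldl pvB_so so), ((l.foldl pvB_pe pe, l.foldl pvB_po po), l.foldl pvB_mi mi)) := by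
    intro l
    induction l with
    | nil => intros; rfl
    | cons x t ih => intros; simp only [List.foldl_cons]; rw [ih]
  rw [key]
  have hse : ∀ (l : List (Int × Int)), l.foldl pvB_se 0 = (l.filter pvCondE).foldl (fun acc x => acc + x.2) 0 := by
    intro l
    have hfun : pvB_se = fun acc x => if pvCondE x then acc + x.2 else acc := by
      funext acc x; simp [pvB_se, pvCondE, Bool.and_comm]
    rw [hfun]
    exact PySem.List.foldl_if_eq_foldl_filter _ _ _ _
  have hso : ∀ (l : List (Int × Int)), l.foldl pvB_so 0 = (l.filter pvCondO).foldl (fun acc x => acc + x.2) 0 := by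
    intro l
    have hfun : pvB_so = fun acc x => if pvCondO x then acc + x.2 else acc := by
      funext acc x; simp [pvB_so, pvCondO, Bool.and_comm]
    rw [hfun]
    exact PySem.List.foldl_if_eq_foldl_filter _ _ _ _
  have hpe : ∀ (l : List (Int × Int)), l.foldl pvB_pe [] = ((l.filter pvCondE).map (fun q => q.1)) := by
    intro l
    have hfun : pvB_pe = fun acc x => if pvCondE x then acc ++ [x.1] else acc := by
      funext acc x; simp [pvB_pe, pvCondE, Bool.and_comm]
    rw [hfun]
    rw [PySem.List.foldl_append_if]
    simp
  have hpo : ∀ (l : List (Int × Int)), l.foldl pvB_po [] = ((l.filter pvCondO).map (fun q => q.1)) := by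
    intro l
    have hfun : pvB_po = fun acc x => if pvCondO x then acc ++ [x.1] else acc := by
      funext acc x; simp [pvB_po, pvCondO, Bool.and_comm]
    rw [hfun]
    rw [PySem.List.foldl_append_if]
    simp
  rw [hse, hso, hpe, hpo, PySem.List.foldl_add, PySem.List.foldl_add]
  simp [pvSumE, pvSumO, pvPosE, pvPosO]

-- A's comprehensions over the swapped pair list are the same class data
theorem pvA_sumO (a : List Int) :
    ((((PySem.List.enumerate a).map (fun p => (p.2, p.1))).filter
        (fun p => !(PySem.Int.mod p.2 2 == 0) && decide (0 < p.1))).map (fun p => p.1)).sum = pvSumO a := by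
  rw [List.filter_map, List.map_map]
  unfold pvSumO
  rw [List.filter_congr (q := pvCondO) (fun x _ => by simp [pvCondO, Bool.and_comm])]
  rfl

theorem pvA_sumE (a : List Int) :
    ((((PySem.List.enumerate a).map (fun p => (p.2, p.1))).filter
        (fun p => (PySem.Int.mod p.2 2 == 0) && decide (0 < p.1))).map (fun p => p.1)).sum = pvSumE a := by
  rw [List.filter_map, List.map_map]
  unfold pvSumE
  rw [List.filter_congr (q := pvCondE) (fun x _ => by simp [pvCondE, Bool.and_comm])]
  rfl

theorem pvA_ynO (a : List Int) :
    (((PySem.List.enumerate a).map (fun p => (p.2, p.1))).filter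
        (fun p => !(PySem.Int.mod p.2 2 == 0) && decide (0 < p.1))).map (fun p => p.2) = pvPosO a := by
  rw [List.filter_map, List.map_map]
  unfold pvPosO
  rw [List.filter_congr (q := pvCondO) (fun x _ => by simp [pvCondO, Bool.and_comm])]
  rfl

theorem pvA_ynE (a : List Int) :
    (((PySem.List.enumerate a).map (fun p => (p.2, p.1))).filter
        (fun p => (PySem.Int.mod p.2 2 == 0) && decide (0 < p.1))).map (fun p => p.2) = pvPosE a := by
  rw [List.filter_map, List.map_map]
  unfold pvPosE
  rw [List.filter_congr (q := pvCondE) (fun x _ => by simp [pvCondE, Bool.and_comm])]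
  rfl

-- structural facts about the position lists
theorem pvPos_pairwise (a : List Int) (c : (Int × Int) → Bool) :
    (((PySem.List.enumerate a).filter c).map (fun q => q.1)).Pairwise (· < ·) := by
  rw [List.pairwise_map]
  exact (PySem.List.pairwise_lt_enumerate a 0).filter c

theorem pvPos_bounds (a : List Int) (c : (Int × Int) → Bool) :
    ∀ x ∈ ((PySem.List.enumerate a).filter c).map (fun q => q.1), 0 ≤ x ∧ x < (a.length : Int) := by
  intro x hx
  rcases List.mem_map.mp hx with ⟨q, hq, rfl⟩
  have hq' := List.mem_of_mem_filter hq
  rcases (PySem.List.mem_enumerate_iff a 0 q).mp hq' with ⟨k, hk, rfl⟩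
  simp
  omega

theorem pvPosE_parity (a : List Int) :
    ∀ x ∈ pvPosE a, (PySem.Int.mod x 2 == 0) = true := by
  intro x hx
  rcases List.mem_map.mp hx with ⟨q, hq, rfl⟩
  have := List.of_mem_filter hq
  simp [pvCondE] at this
  simp [this.1]

theorem pvPosO_parity (a : List Int) :
    ∀ x ∈ pvPosO a, (PySem.Int.mod x 2 == 0) = false := by
  intro x hx
  rcases List.mem_map.mp hx with ⟨q, hq, rfl⟩
  have := List.of_mem_filter hq
  simp [pvCondO] at this
  simp [this.1]

theorem pvSumE_nonneg (a : List Int) : 0 ≤ pvSumE a := by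
  apply List.sum_nonneg
  intro x hx
  rcases List.mem_map.mp hx with ⟨q, hq, rfl⟩
  have := List.of_mem_filter hq
  simp [pvCondE] at this
  omega

theorem pvSumO_nonneg (a : List Int) : 0 ≤ pvSumO a := by
  apply List.sum_nonneg
  intro x hx
  rcases List.mem_map.mp hx with ⟨q, hq, rfl⟩
  have := List.of_mem_filter hq
  simp [pvCondO] at this
  omega

theorem pvPosE_nil (a : List Int) (h : pvPosE a = []) : pvSumE a = 0 := by
  unfold pvPosE at h
  unfold pvSumE
  rw [List.map_eq_nil_iff.mp h]
  rfl

theorem pvPosO_nil (a : List Int) (h : pvPosO a = []) : pvSumO a = 0 := by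
  unfold pvPosO at h
  unfold pvSumO
  rw [List.map_eq_nil_iff.mp h]
  rfl

-- the two argmax scans stay in lockstep (indices in the tail exceed the accumulator's index)
theorem pvTrk (xs : List Int) : ∀ (s m i : Int), i < s →
    ∃ M : Int × Int,
      ((PySem.List.enumerate xs s).map (fun q => (q.2, q.1))).foldl
          (fun acc x => match acc with
            | none => some x
            | some mm =>
                if (decide (mm.1 < x.1) || !decide (x.1 < mm.1) && decide (mm.2 < x.2)) = true
                then some x else some mm)
          (some (m, i))
        = some M
      ∧ (PySem.List.enumerate xs s).foldl pvB_mi (some m, i) = (some M.1, M.2)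
      ∧ (M = (m, i) ∨ M ∈ (PySem.List.enumerate xs s).map (fun q => (q.2, q.1))) := by
  induction xs with
  | nil =>
    intro s m i _
    exact ⟨(m, i), rfl, rfl, Or.inl rfl⟩
  | cons x t ih =>
    intro s m i his
    rw [PySem.List.enumerate_cons, List.map_cons, List.foldl_cons, List.foldl_cons]
    by_cases hmx : m ≤ x
    · have hstepA : (match (some (m, i) : Option (Int × Int)) with
          | none => some ((x, s) : Int × Int)
          | some mm => if (decide (mm.1 < (x, s).1) || !decide ((x, s).1 < mm.1) && decide (mm.2 < (x, s).2)) = true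
              then some (x, s) else some mm) = some (x, s) := by
        by_cases hlt : m < x
        · simp [hlt]
        · have hxm : x = m := by omega
          subst hxm
          simp [his]
      have hstepB : pvB_mi (some m, i) (s, x) = (some x, s) := by
        simp [pvB_mi, hmx]
      rw [hstepA, hstepB]
      obtain ⟨M, hA, hB, hmem⟩ := ih (s + 1) x s (by omega)
      refine ⟨M, hA, hB, ?_⟩
      rcases hmem with rfl | hmem
      · right; simp
      · right; exact List.mem_cons_of_mem _ hmem
    · have hstepA : (match (some (m, i) : Option (Int × Int)) with
          | none => some ((x, s) : Int × Int)
          | some mm => if (decide (mm.1 < (x, s).1) || !decide ((x, s).1 < mm.1) && decide (mm.2 < (x, s).2)) = true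
              then some (x, s) else some mm) = some (m, i) := by
        have h1 : ¬ m < x := by omega
        have h2 : x < m := by omega
        simp [h1, h2]
      have hstepB : pvB_mi (some m, i) (s, x) = (some m, i) := by
        simp [pvB_mi]
        omega
      rw [hstepA, hstepB]
      obtain ⟨M, hA, hB, hmem⟩ := ih (s + 1) m i (by omega)
      refine ⟨M, hA, hB, ?_⟩
      rcases hmem with rfl | hmem
      · left; rfl
      · right; exact List.mem_cons_of_mem _ hmem

theorem pvAP_getElem (a : List Int) (k : Nat) (hk : k < a.length) :
    (((PySem.List.enumerate a).map (fun q => (q.2, q.1)))[k]'(by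
        simp [PySem.List.length_enumerate, hk]) ) = (a[k], (k : Int)) := by
  rw [List.getElem_map, PySem.List.getElem_enumerate]
  simp

-- all-false mask segment
theorem pvMask_none (p : List Int) (s t : Int) (h : ∀ z ∈ p, z < s ∨ t ≤ z) :
    pvMask s t p = List.replicate (t - s).toNat false := by
  unfold pvMask
  rw [List.eq_replicate_iff]
  constructor
  · simp [PySem.List.length_pyRange_one]
  · intro b hb
    rcases List.mem_map.mp hb with ⟨i, hi, rfl⟩
    rw [PySem.List.mem_pyRange_one] at hi
    simp only [decide_eq_false_iff_not]
    intro hmem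
    rcases h i hmem with h' | h' <;> omega

theorem pvHead_le_getLast (l : List Int) (x : Int) (h : (x :: l).Pairwise (· < ·)) :
    ∀ z ∈ x :: l, z ≤ (x :: l).getLast (List.cons_ne_nil x l) := by
  induction l generalizing x with
  | nil => intro z hz; simp at hz; simp [hz]
  | cons y l' ih =>
    intro z hz
    rw [List.getLast_cons (List.cons_ne_nil y l')]
    have hxy : x < y := (List.pairwise_cons.mp h).1 y (by simp)
    have hy := ih y (List.pairwise_cons.mp h).2
    rcases List.mem_cons.mp hz with rfl | hz
    · exact le_trans (le_of_lt hxy) (hy y (by simp))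
    · exact hy z hz

-- the mask between the first and last chosen position, structurally
theorem pvMask_mid (t : List Int) : ∀ (x : Int), (x :: t).Pairwise (· < ·) →
    pvMask x ((x :: t).getLast (List.cons_ne_nil x t) + 1) (x :: t)
      = true :: ((x :: t).zip t).flatMap
          (fun q => List.replicate (q.2 - q.1 - 1).toNat false ++ [true]) := by
  induction t with
  | nil =>
    intro x _
    unfold pvMask
    rw [List.getLast_singleton, PySem.List.pyRange_one_singleton]
    simp
  | cons y t' ih =>
    intro x hpw
    have hpw' : (y :: t').Pairwise (· < ·) := (List.pairwise_cons.mp hpw).2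
    have hxy : x < y := (List.pairwise_cons.mp hpw).1 y (by simp)
    have hLcons : (x :: y :: t').getLast (List.cons_ne_nil x (y :: t'))
        = (y :: t').getLast (List.cons_ne_nil y t') := List.getLast_cons (List.cons_ne_nil y t')
    have hyL : y ≤ (y :: t').getLast (List.cons_ne_nil y t') :=
      pvHead_le_getLast t' y hpw' y (by simp)
    have hsplit : pvMask x ((x :: y :: t').getLast (List.cons_ne_nil x (y :: t')) + 1) (x :: y :: t')
        = pvMask x (x + 1) (x :: y :: t') ++ pvMask (x + 1) y (x :: y :: t')
          ++ pvMask y ((y :: t').getLast (List.cons_ne_nil y t') + 1) (x :: y :: t') := by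
      unfold pvMask
      rw [hLcons,
        PySem.List.pyRange_one_append x y ((y :: t').getLast (List.cons_ne_nil y t') + 1)
          (by omega) (by omega),
        PySem.List.pyRange_one_append x (x + 1) y (by omega) (by omega)]
      simp
    rw [hsplit]
    have hseg1 : pvMask x (x + 1) (x :: y :: t') = [true] := by
      unfold pvMask
      rw [PySem.List.pyRange_one_singleton]
      simp
    have hseg2 : pvMask (x + 1) y (x :: y :: t') = List.replicate (y - x - 1).toNat false := by
      rw [pvMask_none _ _ _ ?_]
      · congr 1
        omega
      · intro z hz
        rcases List.mem_cons.mp hz with rfl | hz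
        · left; omega
        · rcases List.mem_cons.mp hz with rfl | hz
          · right; omega
          · right
            have := (List.pairwise_cons.mp hpw').1 z hz
            omega
    have hseg3 : pvMask y ((y :: t').getLast (List.cons_ne_nil y t') + 1) (x :: y :: t')
        = pvMask y ((y :: t').getLast (List.cons_ne_nil y t') + 1) (y :: t') := by
      unfold pvMask
      apply List.map_congr_left
      intro i hi
      rw [PySem.List.mem_pyRange_one] at hi
      apply decide_eq_decide.mpr
      simp only [List.mem_cons]
      constructor
      · rintro (rfl | h)
        · omega
        · exact h
      · intro h
        right
        exact h
    rw [hseg1, hseg2, hseg3, ih y hpw']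
    rw [List.zip_cons_cons, List.flatMap_cons]
    simp

theorem pvMask_split (p0 : Int) (t : List Int) (N : Int)
    (hpw : (p0 :: t).Pairwise (· < ·))
    (hbd : ∀ x ∈ p0 :: t, 0 ≤ x ∧ x < N) :
    pvMask 0 N (p0 :: t)
      = List.replicate p0.toNat false
        ++ pvMask p0 ((p0 :: t).getLast (List.cons_ne_nil p0 t) + 1) (p0 :: t)
        ++ List.replicate (N - ((p0 :: t).getLast (List.cons_ne_nil p0 t) + 1)).toNat false := by
  have hL := pvHead_le_getLast t p0 hpw
  have h0 : 0 ≤ p0 := (hbd p0 (by simp)).1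
  have hp0L : p0 ≤ (p0 :: t).getLast (List.cons_ne_nil p0 t) := hL p0 (by simp)
  have hLN : (p0 :: t).getLast (List.cons_ne_nil p0 t) < N :=
    (hbd _ (List.getLast_mem (List.cons_ne_nil p0 t))).2
  have hsplit : pvMask 0 N (p0 :: t)
      = pvMask 0 p0 (p0 :: t)
        ++ pvMask p0 ((p0 :: t).getLast (List.cons_ne_nil p0 t) + 1) (p0 :: t)
        ++ pvMask ((p0 :: t).getLast (List.cons_ne_nil p0 t) + 1) N (p0 :: t) := by
    unfold pvMask
    rw [PySem.List.pyRange_one_append 0 p0 N (by omega) (by omega),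
      PySem.List.pyRange_one_append p0 ((p0 :: t).getLast (List.cons_ne_nil p0 t) + 1) N
        (by omega) (by omega)]
    simp
  rw [hsplit]
  have hseg1 : pvMask 0 p0 (p0 :: t) = List.replicate p0.toNat false := by
    rw [pvMask_none _ _ _ ?_]
    · congr 1
      omega
    · intro z hz
      rcases List.mem_cons.mp hz with rfl | hz
      · right; omega
      · right
        have := (List.pairwise_cons.mp hpw).1 z hz
        omega
  have hseg3 : pvMask ((p0 :: t).getLast (List.cons_ne_nil p0 t) + 1) N (p0 :: t)
      = List.replicate (N - ((p0 :: t).getLast (List.cons_ne_nil p0 t) + 1)).toNat false := by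
    rw [pvMask_none _ _ _ ?_]
    intro z hz
    left
    have := hL z hz
    omega
  rw [hseg1, hseg3]

theorem pvMid_getLast? (gs : List Int) :
    (true :: gs.flatMap (fun g => List.replicate (g - 1).toNat false ++ [true])).getLast? = some true := by
  induction gs using List.reverseRecOn with
  | nil => rfl
  | append_singleton gs g _ =>
    rw [List.flatMap_append]
    have : true :: (gs.flatMap (fun g => List.replicate (g - 1).toNat false ++ [true])
            ++ [g].flatMap (fun g => List.replicate (g - 1).toNat false ++ [true]))
        = (true :: (gs.flatMap (fun g => List.replicate (g - 1).toNat false ++ [true])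
            ++ List.replicate (g - 1).toNat false)) ++ [true] := by
      simp
    rw [this, List.getLast?_concat]

-- the three while loops of A, characterised
theorem pvLoop1_repl (k : Nat) : ∀ (l : List Bool) (ans : List Int),
    pvA_loop1 (List.replicate k false ++ true :: l) ans = (true :: l, ans ++ List.replicate k 1) := by
  induction k with
  | zero => intro l ans; simp [pvA_loop1]
  | succ k ih =>
    intro l ans
    rw [List.replicate_succ, List.cons_append]
    show pvA_loop1 (false :: (List.replicate k false ++ true :: l)) ans = _
    rw [pvA_loop1, ih]
    simp [List.replicate_succ]

theorem pvLoop2_repl (t : Nat) : ∀ (l : List Bool) (ans : List Int), l.getLast? = some true →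
    pvA_loop2 (l ++ List.replicate t false) ans
      = (l, ans ++ PySem.List.pyRange ((l.length : Int) + t) (l.length : Int) (-1)) := by
  induction t with
  | zero =>
    intro l ans h
    rw [List.replicate_zero, List.append_nil, pvA_loop2]
    rw [PySem.List.pyRange_neg_one_eq_nil (by omega)]
    simp [h]
  | succ t ih =>
    intro l ans h
    have hlast : (l ++ List.replicate (t + 1) false).getLast? = some false := by
      rw [List.replicate_succ', ← List.append_assoc, List.getLast?_concat]
    have hdrop : (l ++ List.replicate (t + 1) false).dropLast = l ++ List.replicate t false := by
      rw [List.replicate_succ', ← List.append_assoc, List.dropLast_concat]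
    rw [pvA_loop2, dif_pos hlast, hdrop, ih l _ h]
    have hrange : PySem.List.pyRange ((l.length : Int) + ((t : Int) + 1)) (l.length : Int) (-1)
        = ((l.length : Int) + ((t : Int) + 1)) :: PySem.List.pyRange ((l.length : Int) + (t : Int)) (l.length : Int) (-1) := by
      rw [PySem.List.pyRange_neg_one_cons (by omega),
        show (l.length : Int) + ((t : Int) + 1) - 1 = (l.length : Int) + (t : Int) by ring]
    have hlen : ((l ++ List.replicate (t + 1) false).length : Int) = (l.length : Int) + ((t : Int) + 1) := by
      simp
    rw [hlen]
    push_cast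
    rw [hrange]
    simp

theorem pvLoop3_one (ans : List Int) : pvA_loop3 [true] ans = ans := by
  rw [pvA_loop3]
  simp
  intro _ _ _ _ h
  simp at h

theorem pvLoop3_three (b0 b1 b2 : Bool) (ans : List Int) :
    pvA_loop3 [b0, b1, b2] ans = ans ++ [2] := by
  rw [pvA_loop3]
  simp

theorem pvLoop3_big (b0 b1 b2 : Bool) (rest : List Bool) (hr : rest ≠ []) (ans : List Int) :
    pvA_loop3 (b0 :: b1 :: b2 :: rest) ans
      = if b2 then pvA_loop3 (true :: rest) (ans ++ [2])
        else pvA_loop3 (true :: false :: rest.drop 1) (ans ++ [3]) := by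
  have hlen : (b0 :: b1 :: b2 :: rest).length = 3 + rest.length := by simp; omega
  have hr' : 1 ≤ rest.length := List.length_pos_iff.mpr hr
  rw [pvA_loop3]
  rw [if_neg (by omega), if_neg (by omega)]

theorem pvLoop3_gap (k : Nat) : ∀ (T : List Bool) (ans : List Int),
    pvA_loop3 (true :: (List.replicate (2 * k + 1) false ++ true :: T)) ans
      = pvA_loop3 (true :: T) (ans ++ List.replicate k 3 ++ [2]) := by
  induction k with
  | zero =>
    intro T ans
    have hl : true :: (List.replicate (2 * 0 + 1) false ++ true :: T) = true :: false :: true :: T := by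
      norm_num
    rw [hl]
    cases T with
    | nil => rw [pvLoop3_three, pvLoop3_one]; simp
    | cons b T' =>
      rw [pvLoop3_big true false true (b :: T') (List.cons_ne_nil b T') ans, if_pos rfl]
      simp
  | succ k ih =>
    intro T ans
    have hl : true :: (List.replicate (2 * (k + 1) + 1) false ++ true :: T)
        = true :: false :: false :: (List.replicate (2 * k + 1) false ++ true :: T) := by
      have : 2 * (k + 1) + 1 = 2 + (2 * k + 1) := by omega
      rw [this, List.replicate_add]
      simp [List.replicate_succ]
    rw [hl, pvLoop3_big _ _ _ _ (by simp) ans, if_neg (by simp)]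
    have hdrop : (List.replicate (2 * k + 1) false ++ true :: T).drop 1
        = List.replicate (2 * k) false ++ true :: T := by
      rw [List.replicate_succ]
      simp
    rw [hdrop]
    have hl2 : true :: false :: (List.replicate (2 * k) false ++ true :: T)
        = true :: (List.replicate (2 * k + 1) false ++ true :: T) := by
      simp [List.replicate_succ]
    rw [hl2, ih]
    congr 1
    simp [List.replicate_succ]

theorem pvFdiv2 (k : Nat) : (PySem.Int.floordiv ((2 : Int) + 2 * k - 2) 2).toNat = k := by
  have : ((2 : Int) + 2 * k - 2) = 2 * k := by ring
  rw [this, PySem.Int.floordiv, Int.fdiv_eq_ediv]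
  omega

theorem pvMod2 (x : Int) : PySem.Int.mod x 2 = x % 2 := by
  simp [PySem.Int.mod, Int.fmod_eq_emod_of_nonneg]

theorem pvLoop3_gaps (gs : List Int) (hg : ∀ g ∈ gs, 2 ≤ g ∧ PySem.Int.mod g 2 = 0) :
    ∀ ans, pvA_loop3 (true :: gs.flatMap (fun g => List.replicate (g - 1).toNat false ++ [true])) ans
      = ans ++ gs.flatMap (fun g => List.replicate (PySem.Int.floordiv (g - 2) 2).toNat 3 ++ [2]) := by
  induction gs with
  | nil =>
    intro ans
    simp [pvLoop3_one]
  | cons g gs' ih =>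
    intro ans
    obtain ⟨hg2, hgm⟩ := hg g (by simp)
    rw [pvMod2] at hgm
    obtain ⟨k, rfl⟩ : ∃ k : Nat, g = 2 + 2 * (k : Int) := by
      refine ⟨(g - 2).toNat / 2, ?_⟩
      omega
    have hrep : (2 + 2 * (k : Int) - 1).toNat = 2 * k + 1 := by omega
    rw [List.flatMap_cons, hrep]
    have hassoc : (List.replicate (2 * k + 1) false ++ [true])
          ++ gs'.flatMap (fun g => List.replicate (g - 1).toNat false ++ [true])
        = List.replicate (2 * k + 1) false
          ++ true :: gs'.flatMap (fun g => List.replicate (g - 1).toNat false ++ [true]) := by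
      simp
    rw [hassoc, pvLoop3_gap k _ ans, ih (fun g hg' => hg g (by simp [hg'])) _]
    rw [List.flatMap_cons, pvFdiv2]
    simp

theorem pvZip_lt (p : List Int) (hpw : p.Pairwise (· < ·)) :
    ∀ q ∈ p.zip p.tail, q.1 < q.2 := by
  induction p with
  | nil => intro q hq; simp at hq
  | cons x t ih =>
    cases t with
    | nil => intro q hq; simp at hq
    | cons y t' =>
      intro q hq
      rw [List.tail_cons, List.zip_cons_cons] at hq
      rcases List.mem_cons.mp hq with hq | hq
      · subst hq; exact (List.pairwise_cons.mp hpw).1 y (by simp)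
      · exact ih (List.pairwise_cons.mp hpw).2 q hq

theorem pvZip_mem (p : List Int) : ∀ q ∈ p.zip p.tail, q.1 ∈ p ∧ q.2 ∈ p := by
  induction p with
  | nil => intro q hq; simp at hq
  | cons x t ih =>
    cases t with
    | nil => intro q hq; simp at hq
    | cons y t' =>
      intro q hq
      rw [List.tail_cons, List.zip_cons_cons] at hq
      rcases List.mem_cons.mp hq with hq | hq
      · subst hq; exact ⟨by simp, by simp⟩
      · have := ih q hq
        exact ⟨List.mem_cons_of_mem x this.1, List.mem_cons_of_mem x this.2⟩

-- the whole positive branch: A's three loops on the mask produce B's closed form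
theorem pvPos_branch (N p0 : Int) (t : List Int)
    (hpw : (p0 :: t).Pairwise (· < ·))
    (hbd : ∀ x ∈ p0 :: t, 0 ≤ x ∧ x < N)
    (b : Bool) (hpar : ∀ x ∈ p0 :: t, (PySem.Int.mod x 2 == 0) = b) :
    pvA_loop3 (pvA_loop2 (pvA_loop1 (pvMask 0 N (p0 :: t)) []).1 (pvA_loop1 (pvMask 0 N (p0 :: t)) []).2).1
              (pvA_loop2 (pvA_loop1 (pvMask 0 N (p0 :: t)) []).1 (pvA_loop1 (pvMask 0 N (p0 :: t)) []).2).2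
      = List.replicate p0.toNat 1
        ++ PySem.List.pyRange (N - p0) ((p0 :: t).getLast (List.cons_ne_nil p0 t) + 1 - p0) (-1)
        ++ ((p0 :: t).zip t).flatMap
            (fun q => List.replicate (PySem.Int.floordiv (q.2 - q.1 - 2) 2).toNat 3 ++ [2]) := by
  have hp0L : p0 ≤ (p0 :: t).getLast (List.cons_ne_nil p0 t) :=
    pvHead_le_getLast t p0 hpw p0 (by simp)
  have hLN : (p0 :: t).getLast (List.cons_ne_nil p0 t) < N :=
    (hbd _ (List.getLast_mem (List.cons_ne_nil p0 t))).2
  have h00 : 0 ≤ p0 := (hbd p0 (by simp)).1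
  have hbody : ((p0 :: t).zip t).flatMap (fun q => List.replicate (q.2 - q.1 - 1).toNat false ++ [true])
      = (((p0 :: t).zip t).map (fun q => q.2 - q.1)).flatMap
          (fun g => List.replicate (g - 1).toNat false ++ [true]) := by
    rw [List.flatMap_map]
  have hmask : pvMask 0 N (p0 :: t)
      = List.replicate p0.toNat false
        ++ true :: ((((p0 :: t).zip t).map (fun q => q.2 - q.1)).flatMap
              (fun g => List.replicate (g - 1).toNat false ++ [true])
            ++ List.replicate (N - ((p0 :: t).getLast (List.cons_ne_nil p0 t) + 1)).toNat false) := by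
    rw [pvMask_split p0 t N hpw hbd, pvMask_mid t p0 hpw, hbody]
    simp
  rw [hmask, pvLoop1_repl]
  have hcons : true :: ((((p0 :: t).zip t).map (fun q => q.2 - q.1)).flatMap
          (fun g => List.replicate (g - 1).toNat false ++ [true])
        ++ List.replicate (N - ((p0 :: t).getLast (List.cons_ne_nil p0 t) + 1)).toNat false)
      = (true :: (((p0 :: t).zip t).map (fun q => q.2 - q.1)).flatMap
          (fun g => List.replicate (g - 1).toNat false ++ [true]))
        ++ List.replicate (N - ((p0 :: t).getLast (List.cons_ne_nil p0 t) + 1)).toNat false := by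
    simp
  simp only []
  rw [hcons, pvLoop2_repl _ _ _ (pvMid_getLast? _)]
  simp only []
  have hmidlen : (((true :: (((p0 :: t).zip t).map (fun q => q.2 - q.1)).flatMap
        (fun g => List.replicate (g - 1).toNat false ++ [true])).length : Int))
      = (p0 :: t).getLast (List.cons_ne_nil p0 t) + 1 - p0 := by
    have : true :: (((p0 :: t).zip t).map (fun q => q.2 - q.1)).flatMap
          (fun g => List.replicate (g - 1).toNat false ++ [true])
        = pvMask p0 ((p0 :: t).getLast (List.cons_ne_nil p0 t) + 1) (p0 :: t) := by
      rw [pvMask_mid t p0 hpw, hbody]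
    rw [this]
    unfold pvMask
    rw [List.length_map, PySem.List.length_pyRange_one]
    omega
  have htn : ((((N - ((p0 :: t).getLast (List.cons_ne_nil p0 t) + 1)).toNat : Nat) : Int))
      = N - ((p0 :: t).getLast (List.cons_ne_nil p0 t) + 1) := by omega
  rw [pvLoop3_gaps _ ?_]
  · rw [hmidlen, htn]
    have harith : (p0 :: t).getLast (List.cons_ne_nil p0 t) + 1 - p0
          + (N - ((p0 :: t).getLast (List.cons_ne_nil p0 t) + 1)) = N - p0 := by ring
    rw [harith, List.flatMap_map]
    simp
  · intro g hg
    rcases List.mem_map.mp hg with ⟨q, hq, rfl⟩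
    have hlt := pvZip_lt (p0 :: t) hpw q hq
    have hmem := pvZip_mem (p0 :: t) q hq
    have h1 := hpar q.1 hmem.1
    have h2 := hpar q.2 hmem.2
    have hb1 : (PySem.Int.mod q.1 2 == 0) = (PySem.Int.mod q.2 2 == 0) := by rw [h1, h2]
    rw [pvMod2, pvMod2] at hb1
    have h01 : 0 ≤ q.1 := (hbd q.1 hmem.1).1
    rw [pvMod2]
    constructor
    · by_cases he : q.1 % 2 = 0
      · have : q.2 % 2 = 0 := by
          by_contra hne
          simp [he, hne] at hb1
        omega
      · have : ¬ q.2 % 2 = 0 := by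
          by_contra hne
          simp [he, hne] at hb1
        omega
    · by_cases he : q.1 % 2 = 0
      · have : q.2 % 2 = 0 := by
          by_contra hne
          simp [he, hne] at hb1
        omega
      · have : ¬ q.2 % 2 = 0 := by
          by_contra hne
          simp [he, hne] at hb1
        omega


-- combined argmax fact at the top level (a ≠ [])
theorem pvArgmax (a : List Int) (hne : a ≠ []) :
    ∃ (M : Int × Int) (k : Nat),
      PySem.List.max2? ((PySem.List.enumerate a).map (fun q => (q.2, q.1))) (fun p => p.1) (fun p => p.2) = some M
      ∧ PySem.List.index? ((PySem.List.enumerate a).map (fun q => (q.2, q.1))) M = some k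
      ∧ (PySem.List.enumerate a).foldl pvB_mi ((none : Option Int), 0) = (some M.1, M.2)
      ∧ (k : Int) = M.2 := by
  obtain ⟨x, t, rfl⟩ : ∃ x t, a = x :: t := by
    cases a with
    | nil => exact absurd rfl hne
    | cons x t => exact ⟨x, t, rfl⟩
  obtain ⟨M, hA, hB, _⟩ := pvTrk t (0 + 1) x 0 (by omega)
  have hcons : (PySem.List.enumerate (x :: t) 0).map (fun q => (q.2, q.1))
      = (x, 0) :: (PySem.List.enumerate t (0 + 1)).map (fun q => (q.2, q.1)) := by
    rw [PySem.List.enumerate_cons]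
    rfl
  have hAfull : PySem.List.max2? ((PySem.List.enumerate (x :: t) 0).map (fun q => (q.2, q.1)))
      (fun p => p.1) (fun p => p.2) = some M := by
    unfold PySem.List.max2?
    rw [hcons, List.foldl_cons]
    show List.foldl _ (some (x, 0)) _ = some M
    refine Eq.trans (PySem.List.foldl_congr_mem _ _ _ _ ?_) hA
    intro acc y _
    cases acc <;> rfl
  have hBfull : (PySem.List.enumerate (x :: t) 0).foldl pvB_mi ((none : Option Int), 0) = (some M.1, M.2) := by
    rw [PySem.List.enumerate_cons, List.foldl_cons]
    exact hB
  have hmemfull : M ∈ (PySem.List.enumerate (x :: t) 0).map (fun q => (q.2, q.1)) := by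
    rcases pvTrk t (0 + 1) x 0 (by omega) with ⟨M', hA', _, hmem'⟩
    have hMM : M' = M := Option.some_inj.mp (hA'.symm.trans hA)
    subst hMM
    rw [hcons]
    rcases hmem' with rfl | hmem'
    · simp
    · exact List.mem_cons_of_mem _ hmem'
  obtain ⟨k, hk⟩ : ∃ k, PySem.List.index? ((PySem.List.enumerate (x :: t) 0).map (fun q => (q.2, q.1))) M = some k :=
    Option.isSome_iff_exists.mp ((PySem.List.index?_isSome_iff _ _).mpr hmemfull)
  obtain ⟨hklen, hget, _⟩ := PySem.List.getElem_of_index?_eq_some hk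
  have hklen' : k < (x :: t).length := by
    simpa [PySem.List.length_enumerate] using hklen
  have := pvAP_getElem (x :: t) k hklen'
  rw [this] at hget
  exact ⟨M, k, hAfull, hk, hBfull, by rw [← hget]⟩

-- ===== VERDICT (by name: the statement is the Claim_ definition above) =====
theorem maximize_final_element_spec : Claim_equal_maximize_final_element := by
  intro N a _ hpre
  obtain ⟨hne, hdom⟩ := hpre
  unfold Spec_maximize_final_element maximize_final_element maximize_final_element_alt
  rw [pvB_fold_eq]
  simp only [pvA_sumO, pvA_sumE, pvA_ynO, pvA_ynE]
  have hOnn := pvSumO_nonneg a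
  have hEnn := pvSumE_nonneg a
  have hiff : (max (pvSumO a) (pvSumE a) = 0) ↔ (pvSumO a = 0 ∧ pvSumE a = 0) := by
    rw [max_def]
    split_ifs <;> omega
  by_cases hz : pvSumO a = 0 ∧ pvSumE a = 0
  · rw [if_pos (hiff.mpr hz), if_pos hz]
    obtain ⟨M, k, hA, hidx, hB, hk⟩ := pvArgmax a hne
    rw [hA, hB]
    simp only [hidx, Option.getD_some]
    rw [← hk]
    simp
  · rw [if_neg (fun h => hz (hiff.mp h)), if_neg hz]
    have hbdO := pvPos_bounds a pvCondO
    have hbdE := pvPos_bounds a pvCondE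
    have hltO : ∀ x ∈ pvPosO a, x < N := by
      intro x hx
      rcases List.mem_map.mp hx with ⟨q, hq, rfl⟩
      refine hdom q (List.mem_of_mem_filter hq) ?_
      have := List.of_mem_filter hq
      simp [pvCondO] at this
      exact this.2
    have hltE : ∀ x ∈ pvPosE a, x < N := by
      intro x hx
      rcases List.mem_map.mp hx with ⟨q, hq, rfl⟩
      refine hdom q (List.mem_of_mem_filter hq) ?_
      have := List.of_mem_filter hq
      simp [pvCondE] at this
      exact this.2
    by_cases hge : pvSumO a ≥ pvSumE a
    · simp only [if_pos hge]
      have hpne : pvPosO a ≠ [] := by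
        intro h
        have := pvPosO_nil a h
        exact hz (by omega)
      obtain ⟨p0, t, heq⟩ : ∃ p0 t, pvPosO a = p0 :: t := by
        cases h : pvPosO a with
        | nil => exact absurd h hpne
        | cons p0 t => exact ⟨p0, t, rfl⟩
      rw [heq]
      have hkey := pvPos_branch N p0 t
        (by rw [← heq]; exact pvPos_pairwise a pvCondO)
        (by rw [← heq]; intro x hx; exact ⟨(hbdO x hx).1, hltO x (heq ▸ hx)⟩)
        false (by rw [← heq]; exact pvPosO_parity a)
      rw [show ((PySem.List.pyRange 0 N 1).map (fun i => decide (i ∈ p0 :: t))) = pvMask 0 N (p0 :: t) from rfl]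
      rw [hkey]
    · simp only [if_neg hge]
      have hpne : pvPosE a ≠ [] := by
        intro h
        have := pvPosE_nil a h
        exact hz (by omega)
      obtain ⟨p0, t, heq⟩ : ∃ p0 t, pvPosE a = p0 :: t := by
        cases h : pvPosE a with
        | nil => exact absurd h hpne
        | cons p0 t => exact ⟨p0, t, rfl⟩
      rw [heq]
      have hkey := pvPos_branch N p0 t
        (by rw [← heq]; exact pvPos_pairwise a pvCondE)
        (by rw [← heq]; intro x hx; exact ⟨(hbdE x hx).1, hltE x (heq ▸ hx)⟩)
        true (by rw [← heq]; exact pvPosE_parity a)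
      rw [show ((PySem.List.pyRange 0 N 1).map (fun i => decide (i ∈ p0 :: t))) = pvMask 0 N (p0 :: t) from rfl]
      rw [hkey]
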